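-- pv_equiv track=rewrite | github.com/simonpf/gprof_nn | gprof_nn/tiling.py | get_start_and_clips
-- ===== SOURCE A (Python) =====
-- def get_start_and_clips(n, tile_size, overlap):
--     """ Calculate start indices and numbers of clipped pixels for a given
--     side length, tile size and overlap.
--
--     Args:
--         n: The image size to tile in pixels.
--         tile_size: The size of each tile
--         overlap: The number of pixels of overlap.
--
--     Rerturn:
--         A tuple ``(start, clip)`` containing the start indices of each tile
--         and the number of pixels to clip between each neighboring tiles.
--     """
--     start = []
--     clip = []
--     j = 0
--     while j + tile_size < n:
--         start.append(j)
--         if j > 0: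
--             clip.append(overlap // 2)
--         j = j + tile_size - overlap
--     start.append(max(n - tile_size, 0))
--     if len(start) > 1:
--         clip.append((start[-2] + tile_size - start[-1]) // 2)
--     start = start
--     clip = clip
--     return start, clip
-- ===== SOURCE B (Python) =====
-- def get_start_and_clips(n, tile_size, overlap):
--     # Closed form: the number of tiles k is computed arithmetically (ceiling
--     # division) instead of simulating the placement loop; starts and clips are
--     # then written down directly.
--     step = tile_size - overlap
--     last = max(n - tile_size, 0)
--     if tile_size < n:
--         k = -((tile_size - n) // step)
--         start = [i * step for i in range(k)]
--         start.append(last)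
--         clip = [overlap // 2] * (k - 1)
--         clip.append(((k - 1) * step + tile_size - last) // 2)
--     else:
--         start = [last]
--         clip = []
--     return start, clip
-- ===== Notes on version B (the rewrite author's own statement) =====
-- stated objective: alternative
-- what changed: B eliminates A's placement while-loop entirely: the tile count k is computed in closed form by a ceiling division, then the start list is written as an arithmetic progression over range(k) plus the final max(n-tile_size,0), and the clips as overlap//2 repeated k-1 times plus one closed-form final entry.
import Mathlib
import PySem

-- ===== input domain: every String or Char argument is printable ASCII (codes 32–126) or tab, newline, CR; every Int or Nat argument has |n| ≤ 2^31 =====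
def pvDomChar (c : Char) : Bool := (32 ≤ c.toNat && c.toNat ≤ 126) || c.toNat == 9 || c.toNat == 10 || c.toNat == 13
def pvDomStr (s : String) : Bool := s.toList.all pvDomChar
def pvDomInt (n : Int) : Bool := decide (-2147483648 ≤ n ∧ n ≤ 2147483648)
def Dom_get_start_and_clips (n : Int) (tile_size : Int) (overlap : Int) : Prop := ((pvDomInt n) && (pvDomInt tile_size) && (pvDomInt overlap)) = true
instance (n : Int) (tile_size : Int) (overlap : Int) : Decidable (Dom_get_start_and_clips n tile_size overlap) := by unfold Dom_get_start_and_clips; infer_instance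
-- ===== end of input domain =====

-- B replaces A's placement loop by a closed form: the tile count k is obtained by a
-- ceiling division and the start/clip lists are written down directly (objective: alternative).

-- ===== PORT A =====
-- A's while loop, fuel-guarded for totality (Pre_ excludes the inputs where Python A diverges)
def pvLoopA (n : Int) (tile_size : Int) (overlap : Int) :
    Nat → Int → List Int → List Int → List Int × List Int
  | 0, _, start, clip => (start, clip)
  | f + 1, j, start, clip =>
    if j + tile_size < n then
      pvLoopA n tile_size overlap f (j + tile_size - overlap) (start ++ [j])
        (if j > 0 then clip ++ [PySem.Int.floordiv overlap 2] else clip)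
    else (start, clip)

def get_start_and_clips (n : Int) (tile_size : Int) (overlap : Int) : List Int × List Int :=
  let p := pvLoopA n tile_size overlap ((n - tile_size).toNat + 1) 0 [] []
  let start := p.1 ++ [max (n - tile_size) 0]
  let clip :=
    if start.length > 1 then
      p.2 ++ [PySem.Int.floordiv
        (PySem.List.pyGetD start (-2) 0 + tile_size - PySem.List.pyGetD start (-1) 0) 2]
    else p.2
  (start, clip)

-- ===== PORT B =====
def get_start_and_clips_alt (n : Int) (tile_size : Int) (overlap : Int) : List Int × List Int :=
  let step := tile_size - overlap
  let last := max (n - tile_size) 0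
  if tile_size < n then
    let k := -(PySem.Int.floordiv (tile_size - n) step)
    let start := (PySem.List.pyRange 0 k 1).map (fun i => i * step) ++ [last]
    let clip := List.replicate (k - 1).toNat (PySem.Int.floordiv overlap 2)
        ++ [PySem.Int.floordiv ((k - 1) * step + tile_size - last) 2]
    (start, clip)
  else ([last], [])

-- ===== PRECONDITION & SPEC =====
-- Pre_ excludes exactly the inputs where Python A never terminates (and Python B divides
-- by zero or produces garbage): the loop is entered (tile_size < n) with a non-positive
-- step (overlap ≥ tile_size).
def Pre_get_start_and_clips (n : Int) (tile_size : Int) (overlap : Int) : Prop :=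
  tile_size < n → overlap < tile_size
instance (n : Int) (tile_size : Int) (overlap : Int) : Decidable (Pre_get_start_and_clips n tile_size overlap) := by unfold Pre_get_start_and_clips; infer_instance

def pvWitness_get_start_and_clips : Int × Int × Int := (10, 4, 1)

def Spec_get_start_and_clips (n : Int) (tile_size : Int) (overlap : Int) (out : List Int × List Int) : Prop := out = get_start_and_clips_alt n tile_size overlap
instance (n : Int) (tile_size : Int) (overlap : Int) (out : List Int × List Int) : Decidable (Spec_get_start_and_clips n tile_size overlap out) := by unfold Spec_get_start_and_clips; infer_instance

-- ===== CLAIM (what is proved, stated in full; the proofs are below) =====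
def Claim_equal_get_start_and_clips : Prop := ∀ (n : Int) (tile_size : Int) (overlap : Int), Dom_get_start_and_clips n tile_size overlap → Pre_get_start_and_clips n tile_size overlap → Spec_get_start_and_clips n tile_size overlap (get_start_and_clips n tile_size overlap)

-- ===== LEMMAS AND PROOFS =====

-- cons-style views of A's loop
def pvS (n ts ov : Int) : Nat → Int → List Int
  | 0, _ => []
  | f + 1, j => if j + ts < n then j :: pvS n ts ov f (j + ts - ov) else []

def pvC (n ts ov : Int) : Nat → Int → List Int
  | 0, _ => []
  | f + 1, j =>
    if j + ts < n then
      (if j > 0 then [PySem.Int.floordiv ov 2] else []) ++ pvC n ts ov f (j + ts - ov)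
    else []

theorem pvLoopA_eq (n ts ov : Int) :
    ∀ (f : Nat) (j : Int) (sacc cacc : List Int),
      pvLoopA n ts ov f j sacc cacc = (sacc ++ pvS n ts ov f j, cacc ++ pvC n ts ov f j) := by
  intro f
  induction f with
  | zero => intro j sacc cacc; simp [pvLoopA, pvS, pvC]
  | succ f ih =>
    intro j sacc cacc
    by_cases h : j + ts < n
    · by_cases hj : j > 0 <;> simp [pvLoopA, pvS, pvC, h, hj, ih]
    · simp [pvLoopA, pvS, pvC, h]

-- the arithmetic progression j = i*step, as a structural list
def pvProg (step : Int) : Nat → Int → List Int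
  | 0, _ => []
  | c + 1, i => i * step :: pvProg step c (i + 1)

theorem pvS_eq_prog (n ts ov step k : Int) (hstep : step = ts - ov) (hpos : 0 < step)
    (hk1 : (k - 1) * step < n - ts) (hk2 : n - ts ≤ k * step) :
    ∀ (f : Nat) (i : Int), 0 ≤ i → i ≤ k → (k - i).toNat ≤ f →
      pvS n ts ov f (i * step) = pvProg step (k - i).toNat i := by
  intro f
  induction f with
  | zero =>
    intro i _ _ hf
    have : (k - i).toNat = 0 := by omega
    simp [pvS, this, pvProg]
  | succ f ih =>
    intro i hi hik hf
    by_cases h : i * step + ts < n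
    · have hlt : i < k := by nlinarith
      have ht : (k - i).toNat = (k - (i + 1)).toNat + 1 := by omega
      have hnext : i * step + ts - ov = (i + 1) * step := by rw [hstep]; ring
      rw [pvS, if_pos h, hnext, ih (i + 1) (by omega) (by omega) (by omega), ht, pvProg]
    · have hge : k ≤ i := by
        by_contra hc
        push Not at hc
        have : i * step ≤ (k - 1) * step := by nlinarith
        omega
      have : (k - i).toNat = 0 := by omega
      simp [pvS, h, this, pvProg]

theorem pvC_eq_rep (n ts ov step k : Int) (hstep : step = ts - ov) (hpos : 0 < step)
    (hk1 : (k - 1) * step < n - ts) (hk2 : n - ts ≤ k * step) :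
    ∀ (f : Nat) (i : Int), 1 ≤ i → i ≤ k → (k - i).toNat ≤ f →
      pvC n ts ov f (i * step) = List.replicate (k - i).toNat (PySem.Int.floordiv ov 2) := by
  intro f
  induction f with
  | zero =>
    intro i _ _ hf
    have : (k - i).toNat = 0 := by omega
    simp [pvC, this]
  | succ f ih =>
    intro i hi hik hf
    by_cases h : i * step + ts < n
    · have hlt : i < k := by nlinarith
      have hjpos : 0 < i * step := by nlinarith
      have ht : (k - i).toNat = (k - (i + 1)).toNat + 1 := by omega
      have hnext : i * step + ts - ov = (i + 1) * step := by rw [hstep]; ring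
      rw [pvC, if_pos h, if_pos hjpos, hnext, ih (i + 1) (by omega) (by omega) (by omega), ht,
        List.replicate_succ]
      simp
    · have hge : k ≤ i := by
        by_contra hc
        push Not at hc
        have : i * step ≤ (k - 1) * step := by nlinarith
        omega
      have : (k - i).toNat = 0 := by omega
      simp [pvC, h, this]

-- B's range comprehension equals the same progression
theorem pyRange_map_eq_prog (step : Int) :
    ∀ (c : Nat) (i : Int),
      (PySem.List.pyRange i (i + (c : Int)) 1).map (fun m => m * step) = pvProg step c i := by
  intro c
  induction c with
  | zero => intro i; rw [PySem.List.pyRange_one_eq_nil (by omega)]; simp [pvProg]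
  | succ c ih =>
    intro i
    rw [PySem.List.pyRange_one_cons (by omega), List.map_cons,
      show (i + (((c : Nat) + 1 : Nat) : Int)) = (i + 1) + (c : Int) by push_cast; ring,
      ih (i + 1)]
    simp [pvProg]

theorem pvProg_getLast (step : Int) :
    ∀ (c : Nat) (i : Int) (h : pvProg step (c + 1) i ≠ []),
      (pvProg step (c + 1) i).getLast h = (i + c) * step := by
  intro c
  induction c with
  | zero => intro i h; simp [pvProg]
  | succ c ih =>
    intro i h
    show (i * step :: pvProg step (c + 1) (i + 1)).getLast (by simp [pvProg]) = _
    rw [List.getLast_cons (by simp [pvProg]), ih (i + 1) (by simp [pvProg])]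
    push_cast; ring

theorem pyGetD_neg_two_append (xs : List Int) (L : Int) (hx : xs ≠ []) :
    PySem.List.pyGetD (xs ++ [L]) (-2) 0 = xs.getLast hx := by
  have hlen : 1 ≤ xs.length := List.length_pos_iff.mpr hx
  rw [PySem.List.pyGetD_neg_ofNat (xs ++ [L]) 2 0 (by omega)
      (by simp only [List.length_append, List.length_cons, List.length_nil]; omega)]
  simp only [List.length_append, List.length_cons, List.length_nil]
  have hidx : xs.length + (0 + 1) - 2 = xs.length - 1 := by omega
  simp only [hidx]
  rw [List.getElem_append_left (by omega)]
  exact (List.getLast_eq_getElem hx).symm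

theorem get_start_and_clips_eq_alt (n ts ov : Int) (hpre : ts < n → ov < ts) :
    get_start_and_clips n ts ov = get_start_and_clips_alt n ts ov := by
  by_cases hn : ts < n
  · have hov : ov < ts := hpre hn
    set step := ts - ov with hstep
    have hpos : 0 < step := by omega
    set k := -(PySem.Int.floordiv (ts - n) step) with hkdef
    -- bounds for the ceiling division k = ⌈(n-ts)/step⌉
    have hq : PySem.Int.floordiv (ts - n) step = (ts - n) / step :=
      PySem.Int.floordiv_eq_ediv_of_pos hpos
    have hdm := Int.mul_ediv_add_emod (ts - n) step
    have hr0 : 0 ≤ (ts - n) % step := Int.emod_nonneg _ (by omega)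
    have hr1 : (ts - n) % step < step := Int.emod_lt_of_pos _ hpos
    have hk1 : (k - 1) * step < n - ts := by
      have : k * step = -(step * ((ts - n) / step)) := by
        rw [hkdef, hq]; ring
      nlinarith
    have hk2 : n - ts ≤ k * step := by
      have : k * step = -(step * ((ts - n) / step)) := by
        rw [hkdef, hq]; ring
      nlinarith
    have hkpos : 1 ≤ k := by nlinarith
    have hkD : k ≤ n - ts := by nlinarith
    -- A's loop contents
    have hS := pvS_eq_prog n ts ov step k hstep hpos hk1 hk2 ((n - ts).toNat + 1) 0
      le_rfl (by omega) (by omega)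
    rw [zero_mul] at hS
    have hCstep : pvC n ts ov ((n - ts).toNat + 1) 0 = pvC n ts ov (n - ts).toNat (1 * step) := by
      rw [pvC, if_pos (by omega)]
      rw [show (0 : Int) + ts - ov = 1 * step by rw [hstep]; ring]
      simp
    have hC := pvC_eq_rep n ts ov step k hstep hpos hk1 hk2 (n - ts).toNat 1
      le_rfl hkpos (by omega)
    -- assemble A
    unfold get_start_and_clips
    rw [pvLoopA_eq]
    simp only [List.nil_append]
    rw [hS, hCstep, hC]
    -- assemble B
    unfold get_start_and_clips_alt
    rw [if_pos hn]
    simp only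
    rw [show -(PySem.Int.floordiv (ts - n) (ts - ov)) = k from rfl]
    have hrange : (PySem.List.pyRange 0 k 1).map (fun i => i * step) = pvProg step (k).toNat 0 := by
      have := pyRange_map_eq_prog step k.toNat 0
      rw [show ((0 : Int) + (k.toNat : Int)) = k by omega] at this
      simpa [hstep] using this
    have hk0 : (k - 0).toNat = k.toNat := by omega
    rw [hk0]
    -- the start lists agree; now the final clip entry
    obtain ⟨c, hc⟩ : ∃ c, k.toNat = c + 1 := ⟨k.toNat - 1, by omega⟩
    have hne : pvProg step k.toNat 0 ≠ [] := by rw [hc]; simp [pvProg]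
    have hlen2 : (pvProg step k.toNat 0 ++ [max (n - ts) 0]).length > 1 := by
      rcases List.exists_cons_of_ne_nil hne with ⟨a, l, hl⟩
      simp [hl]
    rw [if_pos hlen2]
    rw [PySem.List.pyGetD_neg_one_append_singleton, pyGetD_neg_two_append _ _ hne]
    have hlast : (pvProg step k.toNat 0).getLast hne = (k - 1) * step := by
      simp only [hc]
      rw [pvProg_getLast]
      have : ((c : Nat) : Int) = k - 1 := by omega
      rw [this]; ring
    rw [hlast, hrange, hstep]
  · unfold get_start_and_clips get_start_and_clips_alt
    rw [pvLoopA_eq, if_neg hn]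
    have hS : pvS n ts ov ((n - ts).toNat + 1) 0 = [] := by simp [pvS, hn]
    have hC : pvC n ts ov ((n - ts).toNat + 1) 0 = [] := by simp [pvC, hn]
    rw [hS, hC]
    simp

-- ===== VERDICT (by name: the statement is the Claim_ definition above) =====
theorem get_start_and_clips_spec : Claim_equal_get_start_and_clips := by
  intro n ts ov _ hpre
  exact get_start_and_clips_eq_alt n ts ov hpre
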